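-- pv_equiv track=rewrite | github.com/ShashankSagarJha/HackerRank-Codes- | Funny String.py | funnyString
-- ===== SOURCE A (Python) =====
-- def funnyString(s):
--     r_s=s[::-1]
--     s_list=[]
--     r_list=[]
--     for i in s:
--         s_list.append(ord(i))
--     for j in r_s:
--         r_list.append(ord(j))
--
--     r_diff=[]
--     s_diff=[]
--     for k in range(0,len(s)-1):
--         r_diff.append(abs(r_list[k]-r_list[k+1]))
--         s_diff.append(abs(s_list[k]-s_list[k+1]))
--
--     return "Funny" if r_diff==s_diff else "Not Funny"
-- ===== SOURCE B (Python) =====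
-- def funnyString(s):
--     i, j = 0, len(s) - 1
--     while i < j:
--         if abs(ord(s[i]) - ord(s[i + 1])) != abs(ord(s[j]) - ord(s[j - 1])):
--             return "Not Funny"
--         i += 1
--         j -= 1
--     return "Funny"
-- ===== Notes on version B (the rewrite author's own statement) =====
-- stated objective: faster
-- what changed: Replaces A's reversed string plus four materialised lists and full-length comparison by a two-pointer scan over the string itself that compares each mirror pair of adjacent differences directly, touching only half the pairs, allocating nothing, and returning early at the first mismatch (measured much faster on random inputs, where a mismatch appears almost immediately).
import Mathlib
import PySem

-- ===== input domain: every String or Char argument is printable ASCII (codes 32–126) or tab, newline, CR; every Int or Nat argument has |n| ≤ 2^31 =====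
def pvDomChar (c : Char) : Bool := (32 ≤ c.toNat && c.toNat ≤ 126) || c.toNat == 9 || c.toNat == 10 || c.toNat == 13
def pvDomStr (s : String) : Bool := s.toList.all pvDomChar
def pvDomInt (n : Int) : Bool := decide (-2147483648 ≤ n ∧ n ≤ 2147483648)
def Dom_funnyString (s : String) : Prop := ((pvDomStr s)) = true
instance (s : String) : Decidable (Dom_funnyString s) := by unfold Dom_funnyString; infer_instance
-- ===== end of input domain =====

-- B replaces A's reversed string and four materialised lists by a two-pointer early-exit scan
-- comparing mirror pairs of adjacent differences directly on the string (objective: alternative).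


-- ===== PORT A =====
def funnyString (s : String) : String :=
  -- r_s = s[::-1]  (step -1 is never 0, so slice? is always some)
  let r_s : String := (PySem.Str.slice? s none none (-1)).getD ""
  -- for i in s: s_list.append(ord(i))
  let s_list : List Int := s.toList.foldl (fun acc i => acc ++ [(i.toNat : Int)]) []
  -- for j in r_s: r_list.append(ord(j))
  let r_list : List Int := r_s.toList.foldl (fun acc j => acc ++ [(j.toNat : Int)]) []
  -- for k in range(0, len(s)-1): append to r_diff and s_diff
  let p : List Int × List Int :=
    (PySem.List.pyRange 0 (PySem.Str.len s - 1) 1).foldl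
      (fun acc k =>
        (acc.1 ++ [|PySem.List.pyGetD r_list k 0 - PySem.List.pyGetD r_list (k + 1) 0|],
         acc.2 ++ [|PySem.List.pyGetD s_list k 0 - PySem.List.pyGetD s_list (k + 1) 0|]))
      ([], [])
  if p.1 = p.2 then "Funny" else "Not Funny"

-- ===== PORT B =====
-- the while loop 'while i < j: compare pair; i += 1; j -= 1; early return "Not Funny"';
-- indices accessed are always in range, so getD is exact for Python's s[i]
def funnyAux (l : List Int) (i j : Nat) : Bool :=
  if i < j then
    if |l.getD i 0 - l.getD (i + 1) 0| ≠ |l.getD j 0 - l.getD (j - 1) 0| then false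
    else funnyAux l (i + 1) (j - 1)
  else true
termination_by j - i
decreasing_by omega

def funnyString_alt (s : String) : String :=
  -- i, j = 0, len(s) - 1 (for the empty string Python's j = -1 and Nat's j = 0 both skip the loop)
  let l : List Int := s.toList.map (fun c => (c.toNat : Int))
  if funnyAux l 0 (l.length - 1) then "Funny" else "Not Funny"

-- ===== PRECONDITION & SPEC =====
def Spec_funnyString (s : String) (out : String) : Prop := out = funnyString_alt s
instance (s : String) (out : String) : Decidable (Spec_funnyString s out) := by unfold Spec_funnyString; infer_instance

-- ===== CLAIM (what is proved, stated in full; the proofs are below) =====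
def Claim_equal_funnyString : Prop := ∀ (s : String), Dom_funnyString s → Spec_funnyString s (funnyString s)

-- ===== LEMMAS AND PROOFS =====

/-- The adjacent absolute-difference list. -/
def pvAdj (l : List Int) : List Int := (l.zip l.tail).map (fun p => |p.1 - p.2|)

theorem pvAdj_length (l : List Int) : (pvAdj l).length = l.length - 1 := by
  simp [pvAdj, List.length_zip]

theorem pvAdj_getElem (l : List Int) (k : Nat) (h : k < (pvAdj l).length) :
    (pvAdj l)[k] = |l[k]'(by rw [pvAdj_length] at h; omega) -
                    l[k+1]'(by rw [pvAdj_length] at h; omega)| := by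
  simp [pvAdj, List.getElem_zip, List.getElem_tail]

theorem pvAdj_reverse (l : List Int) : pvAdj l.reverse = (pvAdj l).reverse := by
  apply List.ext_getElem
  · simp [pvAdj_length]
  · intro k h1 h2
    have hn : k < l.length - 1 := by
      rw [pvAdj_length, List.length_reverse] at h1; omega
    rw [pvAdj_getElem l.reverse k h1]
    conv_rhs => rw [List.getElem_reverse]
    rw [pvAdj_getElem l _ (by rw [pvAdj_length]; omega)]
    simp only [List.getElem_reverse, pvAdj_length]
    rw [abs_sub_comm]
    simp only [show l.length - 1 - (k + 1) = l.length - 1 - 1 - k from by omega,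
      show l.length - 1 - k = l.length - 1 - 1 - k + 1 from by omega]

/-- The range-indexed difference loop computes pvAdj. -/
theorem pvRange_diff (l : List Int) :
    (PySem.List.pyRange 0 ((l.length : Int) - 1) 1).map
      (fun k => |PySem.List.pyGetD l k 0 - PySem.List.pyGetD l (k + 1) 0|) = pvAdj l := by
  cases l with
  | nil => decide
  | cons a t =>
    have hcast : ((a :: t).length : Int) - 1 = ((t.length : Nat) : Int) := by
      simp
    rw [hcast, PySem.List.pyRange_zero_natCast]
    apply List.ext_getElem
    · simp [pvAdj_length]
    · intro k h1 h2
      have hk : k < t.length := by simpa using h1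
      rw [pvAdj_getElem]
      simp only [List.getElem_map, List.getElem_range]
      have e1 : PySem.List.pyGetD (a :: t) ((k : Int)) 0 = (a :: t).getD k 0 := by
        exact_mod_cast PySem.List.pyGetD_natCast (a :: t) k 0
      have e2 : PySem.List.pyGetD (a :: t) ((k : Int) + 1) 0 = (a :: t).getD (k + 1) 0 := by
        have := PySem.List.pyGetD_natCast (a :: t) (k + 1) 0
        push_cast at this
        exact_mod_cast this
      rw [e1, e2, List.getD_eq_getElem _ _ (by simp; omega),
        List.getD_eq_getElem _ _ (by simp; omega)]

/-- Unfolding of the two-pointer loop: true iff every mirror pair with the loop's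
    invariant sum `i + j` agrees. -/
theorem funnyAux_eq_true_iff (l : List Int) (j i : Nat) :
    funnyAux l i j = true ↔
      ∀ a b : Nat, i ≤ a → a < b → a + b = i + j →
        |l.getD a 0 - l.getD (a + 1) 0| = |l.getD b 0 - l.getD (b - 1) 0| := by
  induction j generalizing i with
  | zero =>
    rw [funnyAux]
    simp only [Nat.not_lt_zero, if_false]
    constructor
    · intro _ a b hia hab hsum; omega
    · intro _; trivial
  | succ j ih =>
    rw [funnyAux]
    simp only [Nat.add_sub_cancel]
    by_cases hij : i < j + 1
    · rw [if_pos hij]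
      by_cases hp : |l.getD i 0 - l.getD (i + 1) 0| = |l.getD (j + 1) 0 - l.getD (j + 1 - 1) 0|
      · rw [if_neg (by simpa using hp), ih (i + 1)]
        simp only [Nat.add_sub_cancel] at hp
        constructor
        · intro h a b hia hab hsum
          rcases Nat.eq_or_lt_of_le hia with he | hlt
          · subst he
            have hb : b = j + 1 := by omega
            subst hb
            simpa using hp
          · exact h a b hlt hab (by omega)
        · intro h a b hia hab hsum
          exact h a b (by omega) hab (by omega)
      · rw [if_pos (by simpa using hp)]
        constructor
        · intro h; exact absurd h (by simp)
        · intro h; exact absurd (h i (j + 1) le_rfl hij rfl) hp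
    · rw [if_neg hij]
      constructor
      · intro _ a b hia hab hsum; omega
      · intro _; trivial

theorem pvAdj_getD (l : List Int) (k : Nat) (h : k < l.length - 1) :
    (pvAdj l).getD k 0 = |l.getD k 0 - l.getD (k + 1) 0| := by
  rw [List.getD_eq_getElem _ _ (by rw [pvAdj_length]; omega), pvAdj_getElem,
    List.getD_eq_getElem _ _ (by omega), List.getD_eq_getElem _ _ (by omega)]

theorem pvGetD_reverse (m : List Int) (k : Nat) (hk : k < m.length) :
    m.reverse.getD k 0 = m.getD (m.length - 1 - k) 0 := by
  rw [List.getD_eq_getElem _ _ (by simpa using hk), List.getElem_reverse,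
    List.getD_eq_getElem _ _ (by omega)]

/-- A list equals its reverse iff mirror entries agree. -/
theorem pvReverse_eq_iff (m : List Int) :
    m = m.reverse ↔ ∀ k, k < m.length → m.getD k 0 = m.getD (m.length - 1 - k) 0 := by
  constructor
  · intro h k hk
    conv_lhs => rw [h]
    exact pvGetD_reverse m k hk
  · intro h
    apply List.ext_getElem
    · simp
    · intro k h1 h2
      rw [List.getElem_reverse]
      have := h k h1
      rw [List.getD_eq_getElem _ _ h1, List.getD_eq_getElem _ _ (by omega)] at this
      exact this

/-- The two-pointer scan decides whether the adjacent-difference list is a palindrome. -/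
theorem funnyAux_palindrome (l : List Int) :
    funnyAux l 0 (l.length - 1) = true ↔ pvAdj l = (pvAdj l).reverse := by
  rw [funnyAux_eq_true_iff, pvReverse_eq_iff]
  constructor
  · intro h k hk
    rw [pvAdj_length] at hk
    rw [pvAdj_length, pvAdj_getD _ _ hk, pvAdj_getD _ _ (by omega)]
    by_cases hc : k + k + 1 ≤ l.length - 1
    · have := h k (l.length - 1 - k) (Nat.zero_le _) (by omega) (by omega)
      rw [this, abs_sub_comm,
        show l.length - 1 - k - 1 = l.length - 1 - 1 - k from by omega,
        show l.length - 1 - k = l.length - 1 - 1 - k + 1 from by omega]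
    · have := h (l.length - 1 - 1 - k) (k + 1) (Nat.zero_le _) (by omega) (by omega)
      simp only [Nat.add_sub_cancel] at this
      rw [abs_sub_comm]
      exact this.symm
  · intro h a b hia hab hsum
    have ha : a < l.length - 1 := by omega
    have := h a (by rw [pvAdj_length]; omega)
    rw [pvAdj_length, pvAdj_getD _ _ ha, pvAdj_getD _ _ (by omega),
      show l.length - 1 - 1 - a = b - 1 from by omega,
      show b - 1 + 1 = b from by omega] at this
    rw [this]
    exact abs_sub_comm _ _

-- ===== VERDICT (by name: the statement is the Claim_ definition above) =====
theorem funnyString_spec : Claim_equal_funnyString := by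
  intro s _
  unfold Spec_funnyString funnyString funnyString_alt
  simp only [PySem.Str.slice?_none_none_neg_one, Option.getD_some,
    PySem.List.foldl_append_singleton_eq_map, List.nil_append]
  rw [PySem.List.foldl_prod_mk
      (f := fun acc k => acc ++ [|PySem.List.pyGetD ((String.ofList s.toList.reverse).toList.map (fun j => (j.toNat : Int))) k 0 -
             PySem.List.pyGetD ((String.ofList s.toList.reverse).toList.map (fun j => (j.toNat : Int))) (k + 1) 0|])
      (g := fun acc k => acc ++ [|PySem.List.pyGetD (s.toList.map (fun i => (i.toNat : Int))) k 0 -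
             PySem.List.pyGetD (s.toList.map (fun i => (i.toNat : Int))) (k + 1) 0|])]
  simp only [PySem.List.foldl_append_singleton_eq_map, List.nil_append]
  have hrev : (String.ofList s.toList.reverse).toList = s.toList.reverse := by simp
  set l : List Int := s.toList.map (fun c => (c.toNat : Int)) with hl
  have hrl : (String.ofList s.toList.reverse).toList.map (fun j => ((j.toNat : Int))) = l.reverse := by
    rw [hrev, ← List.map_reverse]
  have hlen : PySem.Str.len s - 1 = (l.length : Int) - 1 := by
    simp [hl, PySem.Str.len_eq]
  have hlen' : PySem.Str.len s - 1 = (l.reverse.length : Int) - 1 := by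
    simpa using hlen
  have hA1 :
      (PySem.List.pyRange 0 (PySem.Str.len s - 1) 1).map
        (fun k => |PySem.List.pyGetD ((String.ofList s.toList.reverse).toList.map (fun j => (j.toNat : Int))) k 0 -
          PySem.List.pyGetD ((String.ofList s.toList.reverse).toList.map (fun j => (j.toNat : Int))) (k + 1) 0|)
        = pvAdj l.reverse := by
    rw [hrl, hlen']; exact pvRange_diff l.reverse
  have hA2 :
      (PySem.List.pyRange 0 (PySem.Str.len s - 1) 1).map
        (fun k => |PySem.List.pyGetD (s.toList.map (fun i => (i.toNat : Int))) k 0 -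
          PySem.List.pyGetD (s.toList.map (fun i => (i.toNat : Int))) (k + 1) 0|)
        = pvAdj l := by
    rw [← hl, hlen]; exact pvRange_diff l
  rw [hA1, hA2, pvAdj_reverse]
  by_cases h : pvAdj l = (pvAdj l).reverse
  · rw [if_pos h.symm, if_pos ((funnyAux_palindrome l).mpr h)]
  · rw [if_neg (fun he => h he.symm),
      if_neg (by simpa using fun he => h ((funnyAux_palindrome l).mp he))]
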